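-- pv_equiv track=rewrite | github.com/yuliia83/hillel | Lesson_11/Home_work_2.py | generate_cube_numbers
-- ===== SOURCE A (Python) =====
-- def generate_cube_numbers(limit):
--     num = 2
--     while True:
--         cube = num ** 3
--         if cube >= limit:
--             return
--         yield cube
--         num += 1
-- ===== SOURCE B (Python) =====
-- def generate_cube_numbers(limit):
--     # Find the largest n (at least 1) whose cube is below limit, then emit the cubes
--     # from a precomputed range instead of an unbounded while loop.
--     n = 1
--     while (n + 1) ** 3 < limit:
--         n += 1
--     yield from (i ** 3 for i in range(2, n + 1))
-- ===== Notes on version B (the rewrite author's own statement) =====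
-- stated objective: alternative
-- what changed: B first computes, with an integer bound-finding loop, the largest base whose cube is still below the limit, and then yields the cubes from an explicit precomputed range, replacing A's unbounded while-loop that tests and yields each cube as it goes.
import Mathlib
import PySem

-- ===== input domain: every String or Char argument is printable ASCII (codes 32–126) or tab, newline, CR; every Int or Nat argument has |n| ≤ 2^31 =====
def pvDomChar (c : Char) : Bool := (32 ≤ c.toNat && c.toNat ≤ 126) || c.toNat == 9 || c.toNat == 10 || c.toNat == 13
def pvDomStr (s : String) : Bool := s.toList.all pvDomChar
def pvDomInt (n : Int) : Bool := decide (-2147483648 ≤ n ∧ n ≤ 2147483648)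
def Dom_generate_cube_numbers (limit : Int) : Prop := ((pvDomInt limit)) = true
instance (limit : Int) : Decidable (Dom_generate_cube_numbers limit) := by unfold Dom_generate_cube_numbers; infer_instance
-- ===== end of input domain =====

-- B replaces A's unbounded yielding while-loop by first computing the largest base whose cube is below the limit
-- and then mapping cubing over an explicit range (different decomposition, same cost).

theorem pv_cube_lt (num : Int) : num ^ 3 < (num + 1) ^ 3 := by nlinarith [sq_nonneg num, sq_nonneg (num + 1), sq_nonneg (2 * num + 1)]

-- ===== PORT A =====
-- A's while-loop: yields num**3 while it is < limit, starting at num = 2.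
def pvA_loop (limit num : Int) : List Int :=
  let cube := num ^ 3
  if cube ≥ limit then []
  else cube :: pvA_loop limit (num + 1)
termination_by (limit - num ^ 3).toNat
decreasing_by
  have h := pv_cube_lt num
  simp only [not_le] at *
  omega

def generate_cube_numbers (limit : Int) : List Int := pvA_loop limit 2

-- ===== PORT B =====
-- B's bound-finding loop: returns the largest n, at least the start value, whose cube is below the limit.
def pvFindN (limit n : Int) : Int :=
  if (n + 1) ^ 3 < limit then pvFindN limit (n + 1) else n
termination_by (limit - (n + 1) ^ 3).toNat
decreasing_by
  have h := pv_cube_lt (n + 1)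
  omega

def generate_cube_numbers_alt (limit : Int) : List Int :=
  let n := pvFindN limit 1
  (PySem.List.pyRange 2 (n + 1) 1).map (fun i => i ^ 3)

-- ===== PRECONDITION & SPEC =====
def Spec_generate_cube_numbers (limit : Int) (out : List Int) : Prop := out = generate_cube_numbers_alt limit
instance (limit : Int) (out : List Int) : Decidable (Spec_generate_cube_numbers limit out) := by unfold Spec_generate_cube_numbers; infer_instance

-- ===== CLAIM (what is proved, stated in full; the proofs are below) =====
def Claim_equal_generate_cube_numbers : Prop := ∀ (limit : Int), Dom_generate_cube_numbers limit → Spec_generate_cube_numbers limit (generate_cube_numbers limit)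

-- ===== LEMMAS AND PROOFS =====

theorem pvFindN_ge (limit n : Int) : n ≤ pvFindN limit n := by
  induction n using pvFindN.induct limit with
  | case1 n h ih => rw [pvFindN, if_pos h]; omega
  | case2 n h => rw [pvFindN, if_neg h]

theorem pvA_loop_eq (limit m : Int) :
    pvA_loop limit (m + 1) = (PySem.List.pyRange (m + 1) (pvFindN limit m + 1) 1).map (fun i => i ^ 3) := by
  induction m using pvFindN.induct limit with
  | case1 m h ih =>
    rw [pvFindN, if_pos h]
    rw [pvA_loop]
    have hge := pvFindN_ge limit (m + 1)
    rw [PySem.List.pyRange_one_cons (by omega)]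
    simp only [List.map_cons]
    rw [show m + 1 + 1 = m + 2 by ring] at ih ⊢
    rw [ih, if_neg (by omega)]
  | case2 m h =>
    rw [pvFindN, if_neg h]
    rw [pvA_loop]
    simp only [not_lt] at h
    rw [if_pos (by simpa using h)]
    rw [PySem.List.pyRange_one_eq_nil (by omega)]
    simp

-- ===== VERDICT (by name: the statement is the Claim_ definition above) =====
theorem generate_cube_numbers_spec : Claim_equal_generate_cube_numbers := by
  intro limit _
  unfold Spec_generate_cube_numbers generate_cube_numbers generate_cube_numbers_alt
  simpa using pvA_loop_eq limit 1
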